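-- pv_equiv track=rewrite | github.com/internetvandingen/UTTT_python_tuple | util.py | get_microboard_heuristic
-- ===== SOURCE A (Python) =====
-- def get_microboard_heuristic(m):
-- 	# returns heuristic of microboard that is independent of any of the 8 transformations
-- 	# 3 for middle, 5 for corners and 7 for edges
-- 	total = 0
-- 	for coord in [(0,0),(2,0),(0,2),(2,2)]:
-- 		total += m[coord[0]][coord[1]]*5
-- 	for coord in [(0,1),(1,0),(1,2),(2,1)]:
-- 		total += m[coord[0]][coord[1]]*7
-- 	total += m[1][1]*3
-- 	return total
-- ===== SOURCE B (Python) =====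
-- def get_microboard_heuristic(m):
--     # algebraic decomposition: every cell weighs 7, minus 2 on the even-parity
--     # cells (corners + center, picked out by stride-2 slices), minus an extra 2
--     # on the center:  total = 7*S - 2*E - 2*C
--     s_all = sum(sum(row[:3]) for row in m[:3])
--     s_even = sum(sum(row[:3][i % 2::2]) for i, row in enumerate(m[:3]))
--     return 7 * s_all - 2 * s_even - 2 * m[1][1]
-- ===== Notes on version B (the rewrite author's own statement) =====
-- stated objective: alternative
-- what changed: replaces the three weight-grouped coordinate-list passes by an algebraic decomposition 7*S - 2*E - 2*C, where S is the sum of the 3x3 block, E the sum of its even-parity cells extracted by stride-2 slices, and C the center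
import Mathlib
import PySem

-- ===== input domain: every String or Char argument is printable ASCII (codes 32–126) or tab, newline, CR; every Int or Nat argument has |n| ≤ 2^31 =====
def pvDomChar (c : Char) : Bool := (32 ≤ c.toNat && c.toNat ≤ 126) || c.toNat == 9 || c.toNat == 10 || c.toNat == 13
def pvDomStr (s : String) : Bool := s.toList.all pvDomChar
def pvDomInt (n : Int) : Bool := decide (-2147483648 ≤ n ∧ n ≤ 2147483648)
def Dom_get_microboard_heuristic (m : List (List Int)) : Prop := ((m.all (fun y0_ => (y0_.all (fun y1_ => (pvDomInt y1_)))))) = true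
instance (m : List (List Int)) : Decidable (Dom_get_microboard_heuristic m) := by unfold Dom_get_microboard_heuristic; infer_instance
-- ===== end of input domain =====

-- B computes the weighted sum algebraically as 7*S - 2*E - 2*C (S = sum of the 3x3 block,
-- E = sum of its even-parity cells via stride-2 slices, C = center) instead of A's three
-- weight-grouped coordinate-list passes (objective: alternative; same cost).

-- ===== PORT A =====
-- cell lookup m[i][j]; Pre_ guarantees it is in range (Python raises otherwise)
def pvCell (m : List (List Int)) (i j : Int) : Int :=
  (PySem.List.pyGet? ((PySem.List.pyGet? m i).getD []) j).getD 0

def get_microboard_heuristic (m : List (List Int)) : Int :=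
  let total : Int := 0
  let total := [((0:Int),(0:Int)),(2,0),(0,2),(2,2)].foldl
    (fun t c => t + pvCell m c.1 c.2 * 5) total
  let total := [((0:Int),(1:Int)),(1,0),(1,2),(2,1)].foldl
    (fun t c => t + pvCell m c.1 c.2 * 7) total
  total + pvCell m 1 1 * 3

-- ===== PORT B =====
def get_microboard_heuristic_alt (m : List (List Int)) : Int :=
  let s_all : Int :=
    ((PySem.List.slice m none (some 3)).map
      (fun row => (PySem.List.slice row none (some 3)).sum)).sum
  let s_even : Int :=
    ((PySem.List.enumerate (PySem.List.slice m none (some 3))).map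
      (fun p => ((PySem.List.slice? (PySem.List.slice p.2 none (some 3))
          (some (p.1 % 2)) none 2).getD []).sum)).sum
  7 * s_all - 2 * s_even - 2 * pvCell m 1 1

-- ===== PRECONDITION & SPEC =====
-- Pre_ excludes boards without a full 3x3 of cells, on which Python A raises IndexError
def Pre_get_microboard_heuristic (m : List (List Int)) : Prop :=
  3 ≤ m.length ∧ ∀ r ∈ m.take 3, 3 ≤ r.length
instance (m : List (List Int)) : Decidable (Pre_get_microboard_heuristic m) := by
  unfold Pre_get_microboard_heuristic; infer_instance
def pvWitness_get_microboard_heuristic : List (List Int) := [[1,0,-1],[0,1,0],[-1,0,1]]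
def Spec_get_microboard_heuristic (m : List (List Int)) (out : Int) : Prop := out = get_microboard_heuristic_alt m
instance (m : List (List Int)) (out : Int) : Decidable (Spec_get_microboard_heuristic m out) := by unfold Spec_get_microboard_heuristic; infer_instance

-- ===== CLAIM (what is proved, stated in full; the proofs are below) =====
def Claim_equal_get_microboard_heuristic : Prop := ∀ (m : List (List Int)), Dom_get_microboard_heuristic m → Pre_get_microboard_heuristic m → Spec_get_microboard_heuristic m (get_microboard_heuristic m)

-- ===== LEMMAS AND PROOFS =====
theorem pvGetZero {α : Type} (x0 : α) (xs : List α) :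
    PySem.List.pyGet? (x0 :: xs) 0 = some x0 := by
  simp [PySem.List.pyGet?, PySem.List.pyIdx?]
theorem pvGetOne {α : Type} (x0 x1 : α) (xs : List α) :
    PySem.List.pyGet? (x0 :: x1 :: xs) 1 = some x1 := by
  simp [PySem.List.pyGet?, PySem.List.pyIdx?]
theorem pvStride0 {α : Type} (a b c : α) :
    PySem.List.slice? [a, b, c] (some 0) none 2 = some [a, c] := by
  simp [PySem.List.slice?, PySem.List.sliceIndices, List.range_succ]
theorem pvStride1 {α : Type} (a b c : α) :
    PySem.List.slice? [a, b, c] (some 1) none 2 = some [b] := by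
  simp [PySem.List.slice?, PySem.List.sliceIndices, List.range_succ]
theorem pvGetTwo {α : Type} (x0 x1 x2 : α) (xs : List α) :
    PySem.List.pyGet? (x0 :: x1 :: x2 :: xs) 2 = some x2 := by
  simp [PySem.List.pyGet?, PySem.List.pyIdx?]
  rw [if_pos (by omega)]
  simp

-- ===== VERDICT (by name: the statement is the Claim_ definition above) =====
theorem get_microboard_heuristic_spec : Claim_equal_get_microboard_heuristic := by
  intro m _ hpre
  obtain ⟨hlen, hrows⟩ := hpre
  obtain ⟨r0, r1, r2, rest, rfl⟩ : ∃ r0 r1 r2 rest, m = r0 :: r1 :: r2 :: rest := by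
    match m with
    | r0 :: r1 :: r2 :: rest => exact ⟨r0, r1, r2, rest, rfl⟩
    | [] | [_] | [_, _] => simp at hlen
  have h0 := hrows r0 (by simp [List.take])
  have h1 := hrows r1 (by simp [List.take])
  have h2 := hrows r2 (by simp [List.take])
  obtain ⟨a0, b0, c0, t0, rfl⟩ : ∃ a b c t, r0 = a :: b :: c :: t := by
    match r0 with
    | a :: b :: c :: t => exact ⟨a, b, c, t, rfl⟩
    | [] | [_] | [_, _] => simp at h0
  obtain ⟨a1, b1, c1, t1, rfl⟩ : ∃ a b c t, r1 = a :: b :: c :: t := by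
    match r1 with
    | a :: b :: c :: t => exact ⟨a, b, c, t, rfl⟩
    | [] | [_] | [_, _] => simp at h1
  obtain ⟨a2, b2, c2, t2, rfl⟩ : ∃ a b c t, r2 = a :: b :: c :: t := by
    match r2 with
    | a :: b :: c :: t => exact ⟨a, b, c, t, rfl⟩
    | [] | [_] | [_, _] => simp at h2
  have hsl : ∀ (x0 x1 x2 : List Int) (t : List (List Int)),
      PySem.List.slice (x0 :: x1 :: x2 :: t) none (some 3) = [x0, x1, x2] := by
    intro x0 x1 x2 t
    rw [PySem.List.slice_to (hb := by norm_num)]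
    simp [List.take]
  have hsr : ∀ (a b c : Int) (t : List Int),
      PySem.List.slice (a :: b :: c :: t) none (some 3) = [a, b, c] := by
    intro a b c t
    rw [PySem.List.slice_to (hb := by norm_num)]
    simp [List.take]
  simp only [Spec_get_microboard_heuristic, get_microboard_heuristic, get_microboard_heuristic_alt,
    pvCell, hsl, hsr, List.foldl, pvGetZero, pvGetOne, pvGetTwo, Option.getD_some,
    PySem.List.enumerate_cons, PySem.List.enumerate_nil, List.map, List.sum_cons, List.sum_nil]
  norm_num [pvStride0, pvStride1]
  ring
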